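-- pv_equiv track=rewrite | github.com/LupusSuperbia/Redes-de-computadoras-UnCuyo | TP1/frame_analyzer.py | framer_analyzer
-- ===== SOURCE A (Python) =====
-- def framer_analyzer(frame) :
--     frame_list = []
--
--     index = 0
--     while index != -1  :
--         start = frame.find("7E", index)
--
--         if start == -1 :
--             break
--
--         end = frame.find("7E", start + 1)
--
--         while end != -1 and frame[end - 2: end] == "7D":
--             end = frame.find("7E", end + 1)
--
--         subframe = ''
--         if end == -1 :
--             subframe = frame[start:]
--             index = end
--         elif end != -1:
--             subframe = frame[start:end]
--             index = end
--         frame_list.append(subframe)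
--     return frame_list
-- ===== SOURCE B (Python) =====
-- def framer_analyzer(frame):
--     # Two-pass: first collect delimiter positions, then slice between them.
--     positions = []
--     pos = frame.find("7E")
--     if pos == -1:
--         return []
--     positions.append(pos)
--     while True:
--         pos = frame.find("7E", pos + 1)
--         if pos == -1:
--             break
--         if frame[pos - 2: pos] != "7D":
--             positions.append(pos)
--     frames = []
--     for i in range(len(positions) - 1):
--         frames.append(frame[positions[i]:positions[i + 1]])
--     frames.append(frame[positions[-1]:])
--     return frames
-- ===== Notes on version B (the rewrite author's own statement) =====
-- stated objective: alternative
-- what changed: A's single interleaved loop that finds each frame's end (skipping 7D-escaped 7Es in a nested while) and slices as it goes is replaced by a two-pass structure: one scan collects all unescaped 7E delimiter positions into a list (the first one kept unconditionally, as in A), then a second pass slices the string between consecutive positions and from the last position to the end.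
import Mathlib
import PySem

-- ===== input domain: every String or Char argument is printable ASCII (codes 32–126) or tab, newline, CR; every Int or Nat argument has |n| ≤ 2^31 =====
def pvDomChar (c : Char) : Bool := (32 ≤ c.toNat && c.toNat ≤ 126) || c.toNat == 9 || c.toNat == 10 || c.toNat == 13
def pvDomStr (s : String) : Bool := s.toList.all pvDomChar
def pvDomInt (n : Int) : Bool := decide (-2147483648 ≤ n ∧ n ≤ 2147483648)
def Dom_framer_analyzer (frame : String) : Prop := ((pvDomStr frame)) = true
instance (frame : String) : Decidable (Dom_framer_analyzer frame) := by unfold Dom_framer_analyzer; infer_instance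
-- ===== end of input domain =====

-- B re-implements A's interleaved scan-and-slice as two passes (collect delimiter positions, then slice);
-- equal return value proved for every string.

-- ===== PORT A =====
-- Termination helper for the search loops: a successful find from a Nat base lands at or after the
-- base and at least two characters before the end of the string.
lemma pv_findFrom_cases (s : List Char) (k : Nat) :
    PySem.Chars.findFrom s ['7','E'] ↑k none = -1 ∨
    ∃ m : Nat, PySem.Chars.findFrom s ['7','E'] ↑k none = ↑m ∧ k ≤ m ∧ m + 2 ≤ s.length ∧
      ['7','E'] <+: s.drop m := by
  by_cases hk : k ≤ s.length
  · by_cases h : PySem.Chars.findFrom s ['7','E'] ↑k none = -1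
    · exact Or.inl h
    · right
      obtain ⟨h1, h2, _⟩ := PySem.Chars.findFrom_natCast_spec s ['7','E'] k hk h
      have h0 : (0:Int) ≤ PySem.Chars.findFrom s ['7','E'] ↑k none := le_trans (by positivity) h1
      refine ⟨(PySem.Chars.findFrom s ['7','E'] ↑k none).toNat, (Int.toNat_of_nonneg h0).symm, ?_, ?_, h2⟩
      · omega
      · have := h2.length_le
        simp at this
        omega
  · left
    simp only [PySem.Chars.findFrom]
    rw [if_pos (by omega)]

-- Inner while loop of A: end = frame.find("7E", b); while end != -1 and frame[end-2:end] == "7D":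
-- end = frame.find("7E", end+1).  The argument b is the base of the next find (initially start+1,
-- then end+1 after each escaped hit).
def pvA_inner (s : List Char) (b : Nat) : Int :=
  if h : PySem.Chars.findFrom s ['7','E'] ↑b none = -1 then -1
  else if PySem.List.slice s (some (PySem.Chars.findFrom s ['7','E'] ↑b none - 2))
            (some (PySem.Chars.findFrom s ['7','E'] ↑b none)) = ['7','D'] then
    pvA_inner s ((PySem.Chars.findFrom s ['7','E'] ↑b none).toNat + 1)
  else PySem.Chars.findFrom s ['7','E'] ↑b none
termination_by s.length + 1 - b
decreasing_by
  rcases pv_findFrom_cases s b with hc | ⟨m, hm, hbm, hml, _⟩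
  · exact absurd hc h
  · simp only [hm] at *
    omega

-- The inner loop's result, when not -1, is an unescaped "7E" occurrence at or after the base.
lemma pvA_inner_spec (s : List Char) (b : Nat) :
    pvA_inner s b = -1 ∨
    ∃ m : Nat, pvA_inner s b = ↑m ∧ b ≤ m ∧ m + 2 ≤ s.length ∧ ['7','E'] <+: s.drop m := by
  induction hn : s.length + 1 - b using Nat.strong_induction_on generalizing b with
  | _ n ih =>
  rw [pvA_inner.eq_def]
  rcases pv_findFrom_cases s b with hc | ⟨m, hm, hbm, hml, hocc⟩
  · rw [dif_pos hc]; exact Or.inl rfl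
  · have hne : PySem.Chars.findFrom s ['7','E'] ↑b none ≠ -1 := by rw [hm]; omega
    rw [dif_neg hne, hm]
    simp only [Int.toNat_natCast]
    by_cases hesc : PySem.List.slice s (some ((m:Int) - 2)) (some (m:Int)) = ['7','D']
    · rw [if_pos hesc]
      rcases ih (s.length + 1 - (m + 1)) (by omega) (m + 1) rfl with h' | ⟨m', h', hb', hl', ho'⟩
      · exact Or.inl h'
      · exact Or.inr ⟨m', h', by omega, hl', ho'⟩
    · rw [if_neg hesc]
      exact Or.inr ⟨m, rfl, hbm, hml, hocc⟩

-- Outer while loop of A.  index = -1 is only ever set together with the break-on-next-test, so that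
-- branch returns the final subframe [start:] directly; otherwise index = end and the loop recurses.
def pvA_outer (s : List Char) (index : Nat) : List String :=
  if hs : PySem.Chars.findFrom s ['7','E'] ↑index none = -1 then []
  else if he : pvA_inner s ((PySem.Chars.findFrom s ['7','E'] ↑index none).toNat + 1) = -1 then
    [String.ofList (PySem.List.slice s (some (PySem.Chars.findFrom s ['7','E'] ↑index none)) none)]
  else
    String.ofList (PySem.List.slice s (some (PySem.Chars.findFrom s ['7','E'] ↑index none))
        (some (pvA_inner s ((PySem.Chars.findFrom s ['7','E'] ↑index none).toNat + 1)))) ::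
      pvA_outer s (pvA_inner s ((PySem.Chars.findFrom s ['7','E'] ↑index none).toNat + 1)).toNat
termination_by s.length + 1 - index
decreasing_by
  rcases pv_findFrom_cases s index with hc | ⟨m, hm, hbm, hml, _⟩
  · exact absurd hc hs
  · rw [hm] at he ⊢
    simp only [Int.toNat_natCast] at he ⊢
    rcases pvA_inner_spec s (m + 1) with h | ⟨m', h, hbm', hml', _⟩
    · exact absurd h he
    · rw [h]
      simp only [Int.toNat_natCast]
      omega

def framer_analyzer (frame : String) : List String :=
  pvA_outer frame.toList 0

-- ===== PORT B =====
-- First pass of B's while loop: pos = frame.find("7E", b); stop at -1; keep pos unless escaped;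
-- b is pos+1 of the previous hit.
def pvB_scan (s : List Char) (b : Nat) : List Nat :=
  if h : PySem.Chars.findFrom s ['7','E'] ↑b none = -1 then []
  else if PySem.List.slice s (some (PySem.Chars.findFrom s ['7','E'] ↑b none - 2))
            (some (PySem.Chars.findFrom s ['7','E'] ↑b none)) = ['7','D'] then
    pvB_scan s ((PySem.Chars.findFrom s ['7','E'] ↑b none).toNat + 1)
  else (PySem.Chars.findFrom s ['7','E'] ↑b none).toNat ::
    pvB_scan s ((PySem.Chars.findFrom s ['7','E'] ↑b none).toNat + 1)
termination_by s.length + 1 - b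
decreasing_by
  all_goals
    rcases pv_findFrom_cases s b with hc | ⟨m, hm, hbm, hml, _⟩
    · exact absurd hc h
    · simp only [hm] at *; simp only [Int.toNat_natCast]; omega

-- Second pass of B: slice between consecutive positions, last position to the end of the string.
def pvB_emit (s : List Char) : List Nat → List String
  | [] => []
  | [p] => [String.ofList (PySem.List.slice s (some ↑p) none)]
  | p :: q :: rest =>
      String.ofList (PySem.List.slice s (some ↑p) (some ↑q)) :: pvB_emit s (q :: rest)

def framer_analyzer_alt (frame : String) : List String :=
  if PySem.Chars.find frame.toList ['7','E'] = -1 then []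
  else pvB_emit frame.toList ((PySem.Chars.find frame.toList ['7','E']).toNat ::
    pvB_scan frame.toList ((PySem.Chars.find frame.toList ['7','E']).toNat + 1))

-- ===== PRECONDITION & SPEC =====
def Spec_framer_analyzer (frame : String) (out : List String) : Prop := out = framer_analyzer_alt frame
instance (frame : String) (out : List String) : Decidable (Spec_framer_analyzer frame out) := by unfold Spec_framer_analyzer; infer_instance

-- ===== CLAIM (what is proved, stated in full; the proofs are below) =====
def Claim_equal_framer_analyzer : Prop := ∀ (frame : String), Dom_framer_analyzer frame → Spec_framer_analyzer frame (framer_analyzer frame)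

-- ===== LEMMAS AND PROOFS =====

-- find of a string that starts with the pattern is 0; hence findFrom at an occurrence returns it.
lemma pv_find_of_prefix (t : List Char) (h : ['7','E'] <+: t) :
    PySem.Chars.find t ['7','E'] = 0 := by
  have hinf : ['7','E'] <:+: t := h.isInfix
  have h0 : 0 ≤ PySem.Chars.find t ['7','E'] := (PySem.Chars.find_nonneg_iff t _).mpr hinf
  obtain ⟨_, hmin⟩ := PySem.Chars.find_spec h0
  by_contra hne
  have : 0 < (PySem.Chars.find t ['7','E']).toNat := by omega
  exact hmin 0 this (by simpa using h)

lemma pv_findFrom_self (s : List Char) (m : Nat) (hml : m + 2 ≤ s.length)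
    (hocc : ['7','E'] <+: s.drop m) :
    PySem.Chars.findFrom s ['7','E'] ↑m none = ↑m := by
  rw [PySem.Chars.findFrom_natCast s ['7','E'] m (by omega)]
  rw [pv_find_of_prefix _ hocc]
  simp

-- B's scan equals: first unescaped position found by A's inner loop, then the rest of the scan.
lemma pv_scan_eq_inner (s : List Char) (b : Nat) :
    pvB_scan s b =
      if pvA_inner s b = -1 then []
      else (pvA_inner s b).toNat :: pvB_scan s ((pvA_inner s b).toNat + 1) := by
  induction hn : s.length + 1 - b using Nat.strong_induction_on generalizing b with
  | _ n ih =>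
  rw [pvB_scan.eq_def, pvA_inner.eq_def]
  rcases pv_findFrom_cases s b with hc | ⟨m, hm, hbm, hml, hocc⟩
  · rw [dif_pos hc, dif_pos hc]
    simp
  · have hne : PySem.Chars.findFrom s ['7','E'] ↑b none ≠ -1 := by rw [hm]; omega
    rw [dif_neg hne, dif_neg hne, hm]
    simp only [Int.toNat_natCast]
    by_cases hesc : PySem.List.slice s (some ((m:Int) - 2)) (some (m:Int)) = ['7','D']
    · rw [if_pos hesc, if_pos hesc]
      exact ih (s.length + 1 - (m + 1)) (by omega) (m + 1) rfl
    · rw [if_neg hesc, if_neg hesc, if_neg (by omega : ¬((m:Int) = -1))]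
      simp

-- Main correspondence: from an unescaped-delimiter position m, A's interleaved loop produces
-- exactly B's slices of (m :: scan from m+1).
lemma pv_outer_eq_emit (s : List Char) (m : Nat) (hml : m + 2 ≤ s.length)
    (hocc : ['7','E'] <+: s.drop m) :
    pvA_outer s m = pvB_emit s (m :: pvB_scan s (m + 1)) := by
  induction hn : s.length + 1 - m using Nat.strong_induction_on generalizing m with
  | _ n ih =>
  have hself := pv_findFrom_self s m hml hocc
  have hne : (↑m : Int) ≠ -1 := by omega
  rw [pvA_outer.eq_def, hself, dif_neg hne]
  simp only [Int.toNat_natCast]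
  rw [pv_scan_eq_inner s (m + 1)]
  rcases pvA_inner_spec s (m + 1) with h | ⟨m', h, hbm', hml', hocc'⟩
  · rw [dif_pos h, if_pos h]
    rfl
  · have hne' : pvA_inner s (m + 1) ≠ -1 := by rw [h]; omega
    rw [dif_neg hne', if_neg hne', h]
    simp only [Int.toNat_natCast]
    rw [pvB_emit]
    congr 1
    subst hn
    exact ih (s.length + 1 - m') (by omega) m' hml' hocc' rfl

-- ===== VERDICT (by name: the statement is the Claim_ definition above) =====
theorem framer_analyzer_spec : Claim_equal_framer_analyzer := by
  intro frame _
  unfold Spec_framer_analyzer framer_analyzer framer_analyzer_alt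
  have h0 : PySem.Chars.findFrom frame.toList ['7','E'] ((0:Nat):Int) none
      = PySem.Chars.find frame.toList ['7','E'] := by
    rw [Nat.cast_zero]; exact PySem.Chars.findFrom_zero frame.toList ['7','E']
  by_cases hf : PySem.Chars.find frame.toList ['7','E'] = -1
  · rw [pvA_outer.eq_def, dif_pos (h0.trans hf), if_pos hf]
  · rcases pv_findFrom_cases frame.toList 0 with hc | ⟨m, hm, _, hml, hocc⟩
    · rw [h0] at hc; exact absurd hc hf
    · have hm0 : PySem.Chars.findFrom frame.toList ['7','E'] ((0:Nat):Int) none = (m:Int) := hm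
      rw [h0] at hm
      have hne : (↑m : Int) ≠ -1 := by omega
      rw [pvA_outer.eq_def, hm0, dif_neg hne, if_neg hf, hm]
      simp only [Int.toNat_natCast]
      have hkey := pv_outer_eq_emit frame.toList m hml hocc
      rw [pvA_outer.eq_def, pv_findFrom_self frame.toList m hml hocc, dif_neg hne] at hkey
      simp only [Int.toNat_natCast] at hkey
      exact hkey
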